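-- pv_equiv track=rewrite | github.com/felipevolpone/freeipa-health-checker | freeipa_health_checker/commands_helper.py | process_getcert_data
-- ===== SOURCE A (Python) =====
-- def process_getcert_data(data):
--     data = data.replace('\t', '').splitlines()
--     certs_list = []
--     item = {}
--     first_line = True
--
--     for line in data:
--
--         if first_line:
--             first_line = False
--             continue
--
--         line = line.strip()
--
--         if not line:
--             continue
--
--         if line.startswith('Request ID'):
--             # eg: "Request ID '20170331122405':"
--
--             if any(item):
--                 certs_list.append(item)
--
--             item = {}
--             item['Request ID'] = (line.split('Request ID')[1].strip().replace("'", "")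
--                                       .replace(':', ''))
--             continue
--
--         line_splitted = line.split(':')
--         key = line_splitted[0].strip()
--         value = ''.join(line_splitted[1:]).replace("'", "")
--         item[key] = value.strip()
--
--     certs_list.append(item)
--
--     return certs_list
-- ===== SOURCE B (Python) =====
-- def process_getcert_data(data):
--     lines = [ln for ln in (raw.strip() for raw in data.replace('\t', '').splitlines()[1:]) if ln]
--
--     def run_end(i):
--         # index of the next 'Request ID' header at or after i
--         while i < len(lines) and not lines[i].startswith('Request ID'):
--             i += 1
--         return i
--
--     def parse_kv(item, seg):
--         for ln in seg:
--             parts = ln.split(':')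
--             item[parts[0].strip()] = ''.join(parts[1:]).replace("'", "").strip()
--         return item
--
--     j = run_end(0)
--     preamble = parse_kv({}, lines[:j])
--
--     records = []
--     i = j
--     while i < len(lines):
--         header = lines[i]
--         j = run_end(i + 1)
--         rid = header.split('Request ID')[1].strip().replace("'", "").replace(':', '')
--         records.append(parse_kv({'Request ID': rid}, lines[i + 1:j]))
--         i = j
--
--     if records and not any(preamble):
--         return records
--     return [preamble] + records
-- ===== Notes on version B (the rewrite author's own statement) =====
-- stated objective: alternative
-- what changed: Replaces A's single pass with one fold state machine (certs_list, item, first_line flag) by a pipeline: drop the header line, strip and filter the lines, split them at 'Request ID' headers into a preamble and per-record segments, parse each segment's key/value lines independently, then assemble the list honoring A's flush rules.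
import Mathlib
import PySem

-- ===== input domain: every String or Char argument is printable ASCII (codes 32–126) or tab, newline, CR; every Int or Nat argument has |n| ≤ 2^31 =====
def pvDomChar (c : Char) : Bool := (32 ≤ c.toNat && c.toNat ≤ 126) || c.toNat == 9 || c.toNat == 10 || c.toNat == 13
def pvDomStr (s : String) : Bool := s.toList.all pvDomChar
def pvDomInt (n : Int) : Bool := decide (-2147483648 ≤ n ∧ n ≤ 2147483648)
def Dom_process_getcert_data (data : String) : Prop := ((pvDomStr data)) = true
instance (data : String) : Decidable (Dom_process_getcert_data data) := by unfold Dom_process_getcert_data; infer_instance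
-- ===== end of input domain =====

-- B re-decomposes A's one-pass state machine as: drop the header line, filter to stripped
-- non-empty lines, split at 'Request ID' headers (preamble + records), and assemble;
-- objective: alternative decomposition, same cost.

-- ===== PORT A =====
-- A's single fold over all lines with state (certs_list, item, first_line).
def process_getcert_data (data : String) : List (List (String × String)) :=
  let lines := PySem.Str.splitlines (PySem.Str.replace data "\t" "")
  let st := lines.foldl
    (fun (st : List (PySem.Dict String String) × PySem.Dict String String × Bool) rawline =>
      match st with
      | (certs, item, first) =>
        if first then (certs, item, false)
        else
          let line := PySem.Str.strip rawline
          if line == "" then (certs, item, false)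
          else if PySem.Str.startswith line "Request ID" then
            let certs := if item.keys.any (fun k => !(k == "")) then certs ++ [item] else certs
            -- line.split('Request ID')[1]: ':' and 'Request ID' are non-empty so split? is some;
            -- the startswith guard ensures index 1 exists, the "" defaults are unreachable
            let rid := PySem.Str.replace (PySem.Str.replace
              (PySem.Str.strip (((PySem.Str.split? line "Request ID").getD []).getD 1 "")) "'" "") ":" ""
            (certs, PySem.Dict.empty.insert "Request ID" rid, false)
          else
            let parts := (PySem.Str.split? line ":").getD []
            let key := PySem.Str.strip (parts.headD "")
            let value := PySem.Str.replace (PySem.Str.join "" (parts.drop 1)) "'" ""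
            (certs, item.insert key (PySem.Str.strip value), false))
    ([], PySem.Dict.empty, true)
  (st.1 ++ [st.2.1]).map PySem.Dict.items

-- ===== PORT B =====
def pvIsHeader (ln : String) : Bool := PySem.Str.startswith ln "Request ID"

-- Source B's parse_kv
def pvParseKV (item : PySem.Dict String String) (seg : List String) : PySem.Dict String String :=
  seg.foldl (fun item ln =>
    let parts := (PySem.Str.split? ln ":").getD []      -- ':' non-empty, split? is some
    item.insert (PySem.Str.strip (parts.headD ""))
      (PySem.Str.strip (PySem.Str.replace (PySem.Str.join "" (parts.drop 1)) "'" ""))) item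

-- header.split('Request ID')[1].strip().replace("'", "").replace(':', '') (index 1 exists for a header line)
def pvRid (header : String) : String :=
  PySem.Str.replace (PySem.Str.replace
    (PySem.Str.strip (((PySem.Str.split? header "Request ID").getD []).getD 1 "")) "'" "") ":" ""

-- Source B's while-loop over records; run_end / the slices lines[i+1:j] are the takeWhile/dropWhile split
def pvRecords : List String → List (PySem.Dict String String)
  | [] => []
  | header :: tail =>
    pvParseKV (PySem.Dict.empty.insert "Request ID" (pvRid header))
        (tail.takeWhile (fun ln => !pvIsHeader ln))
      :: pvRecords (tail.dropWhile (fun ln => !pvIsHeader ln))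
  termination_by ls => ls.length
  decreasing_by
    exact Nat.lt_succ_of_le ((List.dropWhile_sublist _).length_le)

def process_getcert_data_alt (data : String) : List (List (String × String)) :=
  let lines := ((PySem.Str.splitlines (PySem.Str.replace data "\t" "")).drop 1).filterMap
      (fun raw => let t := PySem.Str.strip raw; if t == "" then none else some t)
  let preamble := pvParseKV PySem.Dict.empty (lines.takeWhile (fun ln => !pvIsHeader ln))
  let records := pvRecords (lines.dropWhile (fun ln => !pvIsHeader ln))
  (if !records.isEmpty && !(preamble.keys.any (fun k => !(k == ""))) then records
   else preamble :: records).map PySem.Dict.items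

-- ===== PRECONDITION & SPEC =====
def Spec_process_getcert_data (data : String) (out : List (List (String × String))) : Prop := out = process_getcert_data_alt data
instance (data : String) (out : List (List (String × String))) : Decidable (Spec_process_getcert_data data out) := by unfold Spec_process_getcert_data; infer_instance

-- ===== CLAIM (what is proved, stated in full; the proofs are below) =====
def Claim_equal_process_getcert_data : Prop := ∀ (data : String), Dom_process_getcert_data data → Spec_process_getcert_data data (process_getcert_data data)

-- ===== LEMMAS AND PROOFS =====

def pvAstep (st : List (PySem.Dict String String) × PySem.Dict String String × Bool) (rawline : String) :
    List (PySem.Dict String String) × PySem.Dict String String × Bool :=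
  match st with
  | (certs, item, first) =>
    if first then (certs, item, false)
    else
      let line := PySem.Str.strip rawline
      if line == "" then (certs, item, false)
      else if PySem.Str.startswith line "Request ID" then
        let certs := if item.keys.any (fun k => !(k == "")) then certs ++ [item] else certs
        let rid := PySem.Str.replace (PySem.Str.replace
          (PySem.Str.strip (((PySem.Str.split? line "Request ID").getD []).getD 1 "")) "'" "") ":" ""
        (certs, PySem.Dict.empty.insert "Request ID" rid, false)
      else
        let parts := (PySem.Str.split? line ":").getD []
        let key := PySem.Str.strip (parts.headD "")
        let value := PySem.Str.replace (PySem.Str.join "" (parts.drop 1)) "'" ""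
        (certs, item.insert key (PySem.Str.strip value), false)

lemma pvA_unfold (data : String) :
    process_getcert_data data =
      (let st := (PySem.Str.splitlines (PySem.Str.replace data "\t" "")).foldl pvAstep
        ([], PySem.Dict.empty, true)
       (st.1 ++ [st.2.1]).map PySem.Dict.items) := rfl

def pvStepCore (st : List (PySem.Dict String String) × PySem.Dict String String) (line : String) :
    List (PySem.Dict String String) × PySem.Dict String String :=
  if pvIsHeader line then
    ((if st.2.keys.any (fun k => !(k == "")) then st.1 ++ [st.2] else st.1),
     PySem.Dict.empty.insert "Request ID" (pvRid line))
  else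
    let parts := (PySem.Str.split? line ":").getD []
    (st.1, st.2.insert (PySem.Str.strip (parts.headD ""))
      (PySem.Str.strip (PySem.Str.replace (PySem.Str.join "" (parts.drop 1)) "'" "")))

def pvFilt (raw : List String) : List String :=
  raw.filterMap (fun r => let t := PySem.Str.strip r; if t == "" then none else some t)

def pvG (item : PySem.Dict String String) : List String → List (PySem.Dict String String)
  | [] => [item]
  | l :: ls =>
    if pvIsHeader l then
      (if item.keys.any (fun k => !(k == "")) then [item] else []) ++
        pvG (PySem.Dict.empty.insert "Request ID" (pvRid l)) ls
    else
      pvG (pvStepCore ([], item) l).2 ls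

lemma pv_fold_eq_G : ∀ (raw : List String) (acc : List (PySem.Dict String String)) (item),
    (raw.foldl pvAstep (acc, item, false)).1 ++ [(raw.foldl pvAstep (acc, item, false)).2.1]
      = acc ++ pvG item (pvFilt raw) := by
  intro raw
  induction raw with
  | nil => intro acc item; simp [pvFilt, pvG]
  | cons r rs ih =>
    intro acc item
    by_cases h : PySem.Str.strip r = ""
    · have hb : (PySem.Str.strip r == "") = true := by simpa using h
      simp only [List.foldl_cons, pvAstep, pvFilt, List.filterMap_cons, hb, if_true]
      simpa [pvFilt] using ih acc item
    · have hb : (PySem.Str.strip r == "") = false := by simpa using h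
      by_cases hh : PySem.Str.startswith (PySem.Str.strip r) "Request ID"
      · simp only [List.foldl_cons, pvAstep, pvFilt, List.filterMap_cons, hb, Bool.false_eq_true,
          if_false, hh, if_true]
        rw [ih]
        simp only [pvG, pvIsHeader, hh, if_true]
        by_cases ha : item.keys.any (fun k => !(k == "")) = true <;>
          simp only [pvRid, pvFilt, if_true, ha, Bool.false_eq_true, if_false,
            List.append_assoc, List.singleton_append, List.nil_append]
      · have hhb : PySem.Str.startswith (PySem.Str.strip r) "Request ID" = false := by
          simpa using hh
        simp only [List.foldl_cons, pvAstep, pvFilt, List.filterMap_cons, hb, Bool.false_eq_true,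
          if_false, hhb]
        rw [ih]
        simp only [pvG, pvStepCore, pvIsHeader, pvFilt, hhb, Bool.false_eq_true, if_false]


lemma pvParseKV_cons (d : PySem.Dict String String) (l : String) (seg : List String)
    (h : pvIsHeader l = false) :
    pvParseKV d (l :: seg) = pvParseKV (pvStepCore ([], d) l).2 seg := by
  simp only [pvParseKV, pvStepCore, List.foldl_cons, h, Bool.false_eq_true, if_false]

lemma pvMem_keys_parseKV (seg : List String) : ∀ (d : PySem.Dict String String) (k : String),
    k ∈ d.keys → k ∈ (pvParseKV d seg).keys := by
  induction seg with
  | nil => intro d k hk; simpa [pvParseKV] using hk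
  | cons l ls ih =>
    intro d k hk
    simp only [pvParseKV, List.foldl_cons] at *
    exact ih _ _ (by rw [PySem.Dict.mem_keys_insert]; exact Or.inr hk)

lemma pvAny_parseKV (seg : List String) (rid : String) :
    ((pvParseKV (PySem.Dict.empty.insert "Request ID" rid) seg).keys.any
      (fun k => !(k == ""))) = true := by
  rw [List.any_eq_true]
  refine ⟨"Request ID", pvMem_keys_parseKV seg _ _ ?_, by decide⟩
  rw [PySem.Dict.mem_keys_insert]; exact Or.inl rfl

lemma pvG_char : ∀ (L : List String) (item : PySem.Dict String String),
    pvG item L =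
      if (L.dropWhile (fun ln => !pvIsHeader ln)).isEmpty
      then [pvParseKV item (L.takeWhile (fun ln => !pvIsHeader ln))]
      else (if (pvParseKV item (L.takeWhile (fun ln => !pvIsHeader ln))).keys.any
              (fun k => !(k == "")) then [pvParseKV item (L.takeWhile (fun ln => !pvIsHeader ln))] else [])
           ++ pvRecords (L.dropWhile (fun ln => !pvIsHeader ln)) := by
  intro L
  induction L with
  | nil => intro item; simp [pvG, pvParseKV]
  | cons l ls ih =>
    intro item
    by_cases hh : pvIsHeader l = true
    · have h1 : (l :: ls).dropWhile (fun ln => !pvIsHeader ln) = l :: ls := by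
        rw [List.dropWhile_cons_of_neg]; simp [hh]
      have h2 : (l :: ls).takeWhile (fun ln => !pvIsHeader ln) = [] := by
        rw [List.takeWhile_cons_of_neg]; simp [hh]
      rw [h1, h2]
      have hG : pvG (PySem.Dict.empty.insert "Request ID" (pvRid l)) ls = pvRecords (l :: ls) := by
        rw [ih]
        rw [pvRecords]
        by_cases he : (ls.dropWhile (fun ln => !pvIsHeader ln)).isEmpty = true
        · rw [if_pos he]
          rw [List.isEmpty_iff] at he
          rw [he, pvRecords]
        · rw [if_neg (by simp_all), pvAny_parseKV, if_pos rfl]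
          rfl
      simp only [pvG, hh, if_true, pvParseKV, List.foldl_nil, List.isEmpty_cons, if_false,
        Bool.false_eq_true, hG]
    · have hhb : pvIsHeader l = false := by simpa using hh
      have h1 : (l :: ls).dropWhile (fun ln => !pvIsHeader ln)
          = ls.dropWhile (fun ln => !pvIsHeader ln) := by
        rw [List.dropWhile_cons_of_pos]; simp [hhb]
      have h2 : (l :: ls).takeWhile (fun ln => !pvIsHeader ln)
          = l :: ls.takeWhile (fun ln => !pvIsHeader ln) := by
        rw [List.takeWhile_cons_of_pos]; simp [hhb]
      rw [h1, h2]
      have hstep : pvG item (l :: ls) = pvG (pvStepCore ([], item) l).2 ls := by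
        simp [pvG, hhb]
      rw [hstep, ih, pvParseKV_cons _ _ _ hhb]


lemma pvRecords_isEmpty (ls : List String) : (pvRecords ls).isEmpty = ls.isEmpty := by
  cases ls <;> simp [pvRecords]

theorem pv_main (data : String) : process_getcert_data data = process_getcert_data_alt data := by
  rw [pvA_unfold]
  unfold process_getcert_data_alt
  cases hr : PySem.Str.splitlines (PySem.Str.replace data "\t" "") with
  | nil => simp [pvRecords, pvParseKV]
  | cons r rs =>
    have h1 : pvAstep ([], PySem.Dict.empty, true) r = ([], PySem.Dict.empty, false) := rfl
    simp only [List.foldl_cons, h1, List.drop_succ_cons, List.drop_zero]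
    have hfd : rs.filterMap
        (fun raw => let t := PySem.Str.strip raw; if t == "" then none else some t) = pvFilt rs := rfl
    rw [hfd]
    rw [pv_fold_eq_G rs [] PySem.Dict.empty]
    rw [pvG_char]
    rw [List.nil_append]
    by_cases he : ((pvFilt rs).dropWhile (fun ln => !pvIsHeader ln)).isEmpty = true
    · rw [if_pos he]
      have hnil := List.isEmpty_iff.mp (by rw [pvRecords_isEmpty]; exact he)
      simp [hnil]
    · rw [if_neg (by simp_all)]
      rw [show (pvRecords ((pvFilt rs).dropWhile (fun ln => !pvIsHeader ln))).isEmpty = false by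
        rw [pvRecords_isEmpty]; simpa using he]
      by_cases ha : ((pvParseKV PySem.Dict.empty ((pvFilt rs).takeWhile (fun ln => !pvIsHeader ln))).keys.any
          (fun k => !(k == ""))) = true
      · simp only [ha, if_true]
        rw [if_neg (by simpa using ha)]
        simp
      · have ha' : ((pvParseKV PySem.Dict.empty ((pvFilt rs).takeWhile (fun ln => !pvIsHeader ln))).keys.any
            (fun k => !(k == ""))) = false := by simpa using ha
        simp only [ha', Bool.false_eq_true, if_false]
        rw [if_pos (by simpa using ha')]
        simp


-- ===== VERDICT (by name: the statement is the Claim_ definition above) =====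
theorem process_getcert_data_spec : Claim_equal_process_getcert_data := by
  intro data _
  exact pv_main data
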